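-- pv_equiv track=rewrite | github.com/AmrYami/co-pilot | apps/dw/sql_exec_shared.py | _choose_url
-- ===== SOURCE A (Python) =====
-- from typing import Any, Dict, List, Tuple
--
-- def _choose_url(connections: List[Dict[str, str]], datasource: str | None) -> str | None:
--     if not connections:
--         return None
--     ds_norm = (datasource or "").strip().lower()
--     if ds_norm:
--         for entry in connections:
--             entry_name = entry.get("name", "").strip().lower()
--             if entry_name and entry_name == ds_norm:
--                 return entry["url"]
--     if ds_norm:
--         for entry in connections:
--             entry_name = entry.get("name", "").strip().lower()
--             if not entry_name and entry.get("url"):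
--                 return entry["url"]
--     return connections[0].get("url")
-- ===== SOURCE B (Python) =====
-- def _choose_url(connections, datasource):
--     if not connections:
--         return None
--     ds_norm = (datasource or "").strip().lower()
--     if not ds_norm:
--         return connections[0].get("url")
--     fallback = None
--     for entry in connections:
--         name = entry.get("name", "").strip().lower()
--         if name == ds_norm:
--             return entry["url"]
--         if not name and fallback is None and entry.get("url"):
--             fallback = entry.get("url")
--     return fallback if fallback is not None else connections[0].get("url")
-- ===== Notes on version B (the rewrite author's own statement) =====
-- stated objective: simpler
-- what changed: A's two sequential full scans (one for an exact normalized-name match, one for an empty-name fallback) are merged into a single pass that returns on the first exact match and records the first empty-name entry with a truthy url as a fallback variable.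
-- outside the precondition, e.g. on _choose_url([{'name': 'db'}], 'db'): A raises KeyError, B raises KeyError
import Mathlib
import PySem

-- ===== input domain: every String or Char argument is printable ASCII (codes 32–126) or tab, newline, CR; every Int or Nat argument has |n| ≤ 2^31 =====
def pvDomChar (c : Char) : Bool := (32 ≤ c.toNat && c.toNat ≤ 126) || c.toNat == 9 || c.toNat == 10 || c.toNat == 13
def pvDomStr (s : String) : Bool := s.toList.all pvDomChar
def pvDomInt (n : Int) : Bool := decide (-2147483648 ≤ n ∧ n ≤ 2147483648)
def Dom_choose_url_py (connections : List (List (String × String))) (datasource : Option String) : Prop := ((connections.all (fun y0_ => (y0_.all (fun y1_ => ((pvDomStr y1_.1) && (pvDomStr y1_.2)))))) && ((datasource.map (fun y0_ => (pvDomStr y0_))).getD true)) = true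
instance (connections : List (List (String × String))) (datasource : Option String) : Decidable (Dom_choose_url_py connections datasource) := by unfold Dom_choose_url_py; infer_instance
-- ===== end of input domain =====

-- One honest line: B merges A's two sequential scans into a single pass with a
-- recorded first empty-name fallback; objective: simpler (one loop instead of two).

-- dict.get(k) / dict.get(k, dflt) on an association-list dict: first match.
def pvAGet? (e : List (String × String)) (k : String) : Option String :=
  (e.find? (fun p => p.1 == k)).map (fun p => p.2)

def pvAGetD (e : List (String × String)) (k dflt : String) : String :=
  (pvAGet? e k).getD dflt

-- entry.get("name", "").strip().lower()
def pvNormName (e : List (String × String)) : String :=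
  PySem.Str.lower (PySem.Str.strip (pvAGetD e "name" ""))

-- ===== PORT A =====
-- first loop of A: first entry whose nonempty normalized name equals ds_norm → entry["url"]
-- (a missing "url" key is Python's KeyError; the port yields the raw lookup, excluded by Pre_)
def pvLoop1 (dsn : String) : List (List (String × String)) → Option (Option String)
  | [] => none
  | e :: rest =>
    let n := pvNormName e
    if n ≠ "" ∧ n = dsn then some (pvAGet? e "url") else pvLoop1 dsn rest

-- second loop of A: first entry with empty normalized name and truthy url → that url
def pvLoop2 : List (List (String × String)) → Option String
  | [] => none
  | e :: rest =>
    if pvNormName e = "" ∧ pvAGetD e "url" "" ≠ "" then pvAGet? e "url" else pvLoop2 rest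

def choose_url_py (connections : List (List (String × String))) (datasource : Option String) : Option String :=
  match connections with
  | [] => none
  | first :: _ =>
    let dsn := PySem.Str.lower (PySem.Str.strip (datasource.getD ""))
    match (if dsn ≠ "" then pvLoop1 dsn connections else none) with
    | some r => r
    | none =>
      match (if dsn ≠ "" then pvLoop2 connections else none) with
      | some u => some u
      | none => pvAGet? first "url"

-- ===== PORT B =====
-- single pass: return entry["url"] on the first exact match; record the first
-- empty-name truthy url as fallback; after the loop use fallback, else connections[0].get("url")
def pvLoopB (dsn : String) (dflt : Option String) : List (List (String × String)) → Option String → Option String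
  | [], fb => match fb with | some u => some u | none => dflt
  | e :: rest, fb =>
    let n := pvNormName e
    if n = dsn then pvAGet? e "url"
    else
      let fb' := if n = "" ∧ fb = none ∧ pvAGetD e "url" "" ≠ "" then pvAGet? e "url" else fb
      pvLoopB dsn dflt rest fb'

def choose_url_py_alt (connections : List (List (String × String))) (datasource : Option String) : Option String :=
  match connections with
  | [] => none
  | first :: _ =>
    let dsn := PySem.Str.lower (PySem.Str.strip (datasource.getD ""))
    if dsn = "" then pvAGet? first "url"
    else pvLoopB dsn (pvAGet? first "url") connections none

-- ===== PRECONDITION & SPEC =====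
-- Pre_ excludes exactly the inputs on which A raises KeyError: a nonempty normalized
-- datasource whose first name-matching entry has no "url" key (B raises there too).
def Pre_choose_url_py (connections : List (List (String × String))) (datasource : Option String) : Prop :=
  let dsn := PySem.Str.lower (PySem.Str.strip (datasource.getD ""))
  dsn = "" ∨ ∀ e, connections.find? (fun e => pvNormName e == dsn) = some e → (pvAGet? e "url").isSome

instance (connections : List (List (String × String))) (datasource : Option String) : Decidable (Pre_choose_url_py connections datasource) := by unfold Pre_choose_url_py; infer_instance

def pvWitness_choose_url_py : (List (List (String × String))) × Option String :=
  ([[("name", "DB "), ("url", "sqlite://x")], [("url", "u2")]], some "db")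

def Spec_choose_url_py (connections : List (List (String × String))) (datasource : Option String) (out : Option String) : Prop := out = choose_url_py_alt connections datasource
instance (connections : List (List (String × String))) (datasource : Option String) (out : Option String) : Decidable (Spec_choose_url_py connections datasource out) := by unfold Spec_choose_url_py; infer_instance

-- ===== CLAIM (what is proved, stated in full; the proofs are below) =====
def Claim_equal_choose_url_py : Prop := ∀ (connections : List (List (String × String))) (datasource : Option String), Dom_choose_url_py connections datasource → Pre_choose_url_py connections datasource → Spec_choose_url_py connections datasource (choose_url_py connections datasource)

-- ===== LEMMAS AND PROOFS =====

-- B's single pass, with fallback state fb, computes A's two-scan result.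
theorem pvLoopB_eq (dsn : String) (hdsn : dsn ≠ "") (dflt : Option String) :
    ∀ (l : List (List (String × String))) (fb : Option String),
      pvLoopB dsn dflt l fb =
        match pvLoop1 dsn l with
        | some r => r
        | none =>
          match fb with
          | some u => some u
          | none => match pvLoop2 l with | some u => some u | none => dflt := by
  intro l
  induction l with
  | nil => intro fb; cases fb <;> simp [pvLoopB, pvLoop1, pvLoop2]
  | cons e rest ih =>
    intro fb
    simp only [pvLoopB, pvLoop1, pvLoop2]
    by_cases hn : pvNormName e = dsn
    · have hne : pvNormName e ≠ "" := hn ▸ hdsn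
      rw [if_pos hn, if_pos ⟨hne, hn⟩]
    · have h1 : ¬ (pvNormName e ≠ "" ∧ pvNormName e = dsn) := fun h => hn h.2
      rw [if_neg hn, if_neg h1, ih]
      cases h2 : pvLoop1 dsn rest with
      | some r => simp
      | none =>
        simp only
        cases fb with
        | some u =>
          have : (if pvNormName e = "" ∧ (some u : Option String) = none ∧ pvAGetD e "url" "" ≠ "" then pvAGet? e "url" else some u) = some u := by
            rw [if_neg]; rintro ⟨-, h, -⟩; cases h
          rw [this]
        | none =>
          by_cases hf : pvNormName e = "" ∧ pvAGetD e "url" "" ≠ ""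
          · rw [if_pos ⟨hf.1, rfl, hf.2⟩, if_pos hf]
            cases h3 : pvAGet? e "url" with
            | none => exact absurd (by simp [pvAGetD, h3]) hf.2
            | some u => simp
          · have h2 : ¬ (pvNormName e = "" ∧ (none : Option String) = none ∧ pvAGetD e "url" "" ≠ "") := by
              rintro ⟨ha, -, hb⟩; exact hf ⟨ha, hb⟩
            rw [if_neg h2, if_neg hf]

-- ===== VERDICT (by name: the statement is the Claim_ definition above) =====
theorem choose_url_py_spec : Claim_equal_choose_url_py := by
  intro connections datasource _ _
  unfold Spec_choose_url_py
  cases connections with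
  | nil => rfl
  | cons first rest =>
    by_cases h : PySem.Str.lower (PySem.Str.strip (datasource.getD "")) = ""
    · simp [choose_url_py, choose_url_py_alt, h]
    · simp only [choose_url_py, choose_url_py_alt]
      rw [if_neg h, pvLoopB_eq _ h, if_pos h, if_pos h]
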